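-- pv_equiv track=rewrite | github.com/Ulixes-8/Novel-Proximity-Based-Exploration-Bonus-for-Multi-Agent-Reinforcement-Learning | nrl985-master/code/analysis/network_topologies_analysis.py | line_graph
-- ===== SOURCE A (Python) =====
-- def line_graph(num_of_agents):
--
--     """
--     Creates a line graph adjacency table
--     num_of_agents - The number of agents
--
--     Return an adjacency table for a line graph
--     """
--
--     adj = []
--
--     for i in range(num_of_agents):
--         neighbours = []
--         for j in range(num_of_agents):
--             if j == i -1 or j == i+1:
--                 neighbours.append(1)
--             else:
--                 neighbours.append(0)
--
--         adj.append(neighbours)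
--
--     return adj
-- ===== SOURCE B (Python) =====
-- def line_graph(num_of_agents):
--     adj = [[0] * num_of_agents for _ in range(num_of_agents)]
--     for i in range(num_of_agents):
--         if i - 1 >= 0:
--             adj[i][i - 1] = 1
--         if i + 1 < num_of_agents:
--             adj[i][i + 1] = 1
--     return adj
-- ===== Notes on version B (the rewrite author's own statement) =====
-- stated objective: simpler
-- what changed: B allocates an all-zeros n x n matrix and sets only the two neighbour cells per row with guarded direct writes, instead of A's inner j-loop testing every cell.
import Mathlib
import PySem

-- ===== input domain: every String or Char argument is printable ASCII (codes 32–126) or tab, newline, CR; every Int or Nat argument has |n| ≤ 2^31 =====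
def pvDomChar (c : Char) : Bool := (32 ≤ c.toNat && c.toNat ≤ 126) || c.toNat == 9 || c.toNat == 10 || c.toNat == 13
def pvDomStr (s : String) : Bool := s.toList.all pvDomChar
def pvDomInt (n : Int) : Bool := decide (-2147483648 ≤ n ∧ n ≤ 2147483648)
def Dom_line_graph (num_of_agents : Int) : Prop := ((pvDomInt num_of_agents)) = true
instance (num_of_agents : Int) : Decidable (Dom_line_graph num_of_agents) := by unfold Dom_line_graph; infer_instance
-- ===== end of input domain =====

-- B builds an all-zeros matrix and then sets only the two neighbour cells of each row
-- with guarded direct writes, instead of A's inner loop testing every cell (simpler).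

-- ===== PORT A =====
def line_graph (num_of_agents : Int) : List (List Int) :=
  (PySem.List.pyRange 0 num_of_agents 1).foldl (fun adj i =>
    adj ++ [(PySem.List.pyRange 0 num_of_agents 1).foldl (fun neighbours j =>
      neighbours ++ [if j = i - 1 ∨ j = i + 1 then (1 : Int) else 0]) []]) []

-- ===== PORT B =====
def line_graph_alt (num_of_agents : Int) : List (List Int) :=
  let adj := (PySem.List.pyRange 0 num_of_agents 1).map
    (fun _ => List.replicate num_of_agents.toNat (0 : Int))
  (PySem.List.pyRange 0 num_of_agents 1).foldl (fun adj i =>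
    let adj := if 0 ≤ i - 1 then adj.modify i.toNat (fun row => row.set (i - 1).toNat 1) else adj
    if i + 1 < num_of_agents then adj.modify i.toNat (fun row => row.set (i + 1).toNat 1) else adj)
    adj

-- ===== PRECONDITION & SPEC =====
def Spec_line_graph (num_of_agents : Int) (out : List (List Int)) : Prop := out = line_graph_alt num_of_agents
instance (num_of_agents : Int) (out : List (List Int)) : Decidable (Spec_line_graph num_of_agents out) := by unfold Spec_line_graph; infer_instance

-- ===== CLAIM (what is proved, stated in full; the proofs are below) =====
def Claim_equal_line_graph : Prop := ∀ (num_of_agents : Int), Dom_line_graph num_of_agents → Spec_line_graph num_of_agents (line_graph num_of_agents)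

-- ===== LEMMAS AND PROOFS =====

-- B's per-row update: the two guarded writes of row i, as one function.
def updB (m i : Nat) (row : List Int) : List Int :=
  let row := if 0 ≤ (i : Int) - 1 then row.set ((i : Int) - 1).toNat 1 else row
  if (i : Int) + 1 < (m : Int) then row.set ((i : Int) + 1).toNat 1 else row

theorem updB_replicate_eq_rowA (m k : Nat) (hk : k < m) :
    updB m k (List.replicate m (0 : Int))
      = (List.range m).map
          (fun (j : Nat) => if (j : Int) = (k : Int) - 1 ∨ (j : Int) = (k : Int) + 1 then (1 : Int) else 0) := by
  unfold updB
  apply List.ext_getElem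
  · split_ifs <;> simp
  · intro j h1 h2
    have hj : j < m := by simpa using h2
    simp only [List.getElem_map, List.getElem_range]
    split_ifs with hA hB hB <;>
      simp only [List.getElem_set, List.getElem_replicate] <;>
      split_ifs <;> omega

theorem stepB_eq (m k : Nat) (adj : List (List Int)) :
    (if (k : Int) + 1 < (m : Int) then
        (if 0 ≤ (k : Int) - 1 then
            adj.modify k (fun row => row.set ((k : Int) - 1).toNat 1) else adj).modify k
          (fun row => row.set ((k : Int) + 1).toNat 1)
     else if 0 ≤ (k : Int) - 1 then
        adj.modify k (fun row => row.set ((k : Int) - 1).toNat 1) else adj)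
      = adj.modify k (updB m k) := by
  split_ifs with h1 h2 h3
  · rw [List.modify_modify_eq]; congr 1; funext row
    have h2' : (1:Nat) ≤ k := by omega
    have h1' : k + 1 < m := by omega
    simp [updB, h1, h2']
  · have hk : k = 0 := by omega
    subst hk
    have h1' : 1 < m := by omega
    congr 1; funext row; simp [updB, h1']
  · congr 1; funext row
    have h3' : (1:Nat) ≤ k := by omega
    have h1' : ¬ (k + 1 < m) := by omega
    simp [updB, h1, h3']
  · have hk : k = 0 := by omega
    subst hk
    have h1' : ¬ (1 < m) := by omega
    rw [show updB m 0 = id from funext fun row => by simp [updB, h1'], List.modify_id]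

-- a fold of steps that each modify only index k is a mapIdx
theorem foldl_modify_range {α : Type} (g : Nat → α → α) (m : Nat) (adj : List α) :
    (List.range m).foldl (fun a k => a.modify k (g k)) adj
      = adj.mapIdx (fun k x => if k < m then g k x else x) := by
  induction m generalizing adj with
  | zero => apply List.ext_getElem <;> simp
  | succ m ih =>
    rw [List.range_succ, List.foldl_append]
    simp only [List.foldl_cons, List.foldl_nil, ih]
    apply List.ext_getElem
    · simp
    · intro k h1 h2
      simp only [List.getElem_modify, List.getElem_mapIdx]
      by_cases hk : m = k <;> split_ifs <;> simp_all <;> omega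

theorem main_eq (m : Nat) : line_graph (m : Int) = line_graph_alt (m : Int) := by
  unfold line_graph line_graph_alt
  simp only [PySem.List.pyRange_one, Int.sub_zero, Int.toNat_natCast, List.foldl_map, zero_add]
  rw [PySem.List.foldl_append_singleton_eq_map, List.nil_append,
    List.map_const', List.length_map, List.length_range,
    List.foldl_ext _ (fun a k => a.modify k (updB m k)) _
      (fun adj k _ => stepB_eq m k adj),
    foldl_modify_range]
  apply List.ext_getElem
  · simp
  · intro k h1 h2
    have hk : k < m := by simpa using h2
    simp only [List.getElem_map, List.getElem_range, List.getElem_mapIdx, List.getElem_replicate,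
      if_pos hk]
    rw [updB_replicate_eq_rowA m k hk, PySem.List.foldl_append_singleton_eq_map, List.nil_append]

-- ===== VERDICT (by name: the statement is the Claim_ definition above) =====
theorem line_graph_spec : Claim_equal_line_graph := by
  intro n _
  unfold Spec_line_graph
  rcases Int.lt_or_le n 0 with hn | hn
  · simp [line_graph, line_graph_alt, PySem.List.pyRange_one_eq_nil (by omega : n ≤ 0)]
  · obtain ⟨m, rfl⟩ : ∃ m : Nat, n = (m : Int) := ⟨n.toNat, by omega⟩
    exact main_eq m
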